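-- pv_equiv track=rewrite | github.com/Gemeri/stock-trading-bot | sub-beta/main.py | _stable_union_columns
-- ===== SOURCE A (Python) =====
-- from typing import Any, Dict, Optional, List, Tuple, Callable
--
-- def _stable_union_columns(existing: List[str], desired: List[str]) -> List[str]:
--     """Return a stable union with 'ts' first, then desired order, then any extras."""
--     if not existing:
--         return desired
--     out = ["ts"]
--     desired_body = [c for c in desired if c != "ts"]
--     exist_body = [c for c in existing if c != "ts"]
--     # Desired first
--     out.extend(desired_body)
--     # Then any existing columns not yet included
--     out.extend([c for c in exist_body if c not in desired_body])
--     # De-dup while preserving order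
--     seen = set()
--     uniq = []
--     for c in out:
--         if c not in seen:
--             uniq.append(c)
--             seen.add(c)
--     return uniq
-- ===== SOURCE B (Python) =====
-- def _stable_union_columns(existing, desired):
--     """Return a stable union with 'ts' first, then desired order, then any extras."""
--     if not existing:
--         return desired
--     seen = set()
--     result = []
--     for c in ["ts"] + desired + existing:
--         if c not in seen:
--             seen.add(c)
--             result.append(c)
--     return result
-- ===== Notes on version B (the rewrite author's own statement) =====
-- stated objective: simpler
-- what changed: Replaces A's build-of-three-filtered-segments followed by a separate dedup loop with one first-occurrence pass over ['ts'] + desired + existing guarded by a seen-set.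
import Mathlib
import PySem

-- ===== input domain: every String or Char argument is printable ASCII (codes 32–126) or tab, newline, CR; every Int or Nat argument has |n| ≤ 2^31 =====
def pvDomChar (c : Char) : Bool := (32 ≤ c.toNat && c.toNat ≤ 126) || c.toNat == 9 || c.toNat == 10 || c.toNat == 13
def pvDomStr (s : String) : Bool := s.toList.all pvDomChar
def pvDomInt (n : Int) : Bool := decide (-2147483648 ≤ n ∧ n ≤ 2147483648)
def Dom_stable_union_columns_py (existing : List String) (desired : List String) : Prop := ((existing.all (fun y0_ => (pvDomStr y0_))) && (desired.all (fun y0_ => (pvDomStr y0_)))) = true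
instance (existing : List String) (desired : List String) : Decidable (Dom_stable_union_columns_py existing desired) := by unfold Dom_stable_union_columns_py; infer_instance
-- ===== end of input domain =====

-- B replaces A's three filtered segment builds plus separate dedup loop by one
-- first-occurrence pass over ["ts"] ++ desired ++ existing guarded by a seen set (objective: simpler).

-- ===== PORT A =====
def stable_union_columns_py (existing : List String) (desired : List String) : List String :=
  if existing = [] then desired
  else
    let desired_body := desired.filter (fun c => decide (c ≠ "ts"))
    let exist_body := existing.filter (fun c => decide (c ≠ "ts"))
    let out := ["ts"] ++ desired_body ++ exist_body.filter (fun c => !(desired_body.contains c))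
    -- de-dup loop: seen = set(); uniq = []
    (out.foldl (fun (st : PySem.Set String × List String) c =>
        if PySem.Set.contains st.1 c then st
        else (PySem.Set.add st.1 c, st.2 ++ [c])) (PySem.Set.empty, [])).2

-- ===== PORT B =====
-- the single for-loop of Source B, with `seen` and the result built as it goes
def altLoop (seen : PySem.Set String) : List String → List String
  | [] => []
  | c :: rest =>
    if PySem.Set.contains seen c then altLoop seen rest
    else c :: altLoop (PySem.Set.add seen c) rest

def stable_union_columns_py_alt (existing : List String) (desired : List String) : List String :=
  if existing = [] then desired
  else altLoop PySem.Set.empty (["ts"] ++ desired ++ existing)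

-- ===== PRECONDITION & SPEC =====
def Spec_stable_union_columns_py (existing : List String) (desired : List String) (out : List String) : Prop := out = stable_union_columns_py_alt existing desired
instance (existing : List String) (desired : List String) (out : List String) : Decidable (Spec_stable_union_columns_py existing desired out) := by unfold Spec_stable_union_columns_py; infer_instance

-- ===== CLAIM (what is proved, stated in full; the proofs are below) =====
def Claim_equal_stable_union_columns_py : Prop := ∀ (existing : List String) (desired : List String), Dom_stable_union_columns_py existing desired → Spec_stable_union_columns_py existing desired (stable_union_columns_py existing desired)

-- ===== LEMMAS AND PROOFS =====

theorem contains_iff_mem (s : PySem.Set String) (c : String) :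
    PySem.Set.contains s c = true ↔ c ∈ s := by
  simp [PySem.Set.contains]

-- first-occurrence dedup continuation, returning the final seen set and the output
def ddS (seen : PySem.Set String) : List String → PySem.Set String × List String
  | [] => (seen, [])
  | c :: rest =>
    if c ∈ seen then ddS seen rest
    else ((ddS (PySem.Set.add seen c) rest).1, c :: (ddS (PySem.Set.add seen c) rest).2)

theorem foldA_eq_ddS (l : List String) (seen : PySem.Set String) (acc : List String) :
    l.foldl (fun (st : PySem.Set String × List String) c =>
        if PySem.Set.contains st.1 c then st
        else (PySem.Set.add st.1 c, st.2 ++ [c])) (seen, acc)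
      = ((ddS seen l).1, acc ++ (ddS seen l).2) := by
  induction l generalizing seen acc with
  | nil => simp [ddS]
  | cons c rest ih =>
    simp only [List.foldl, ddS]
    by_cases h : c ∈ seen
    · rw [if_pos ((contains_iff_mem _ _).mpr h), if_pos h, ih]
    · rw [if_neg (fun hc => h ((contains_iff_mem _ _).mp hc)), if_neg h, ih]
      simp

theorem altLoop_eq_ddS (l : List String) (seen : PySem.Set String) :
    altLoop seen l = (ddS seen l).2 := by
  induction l generalizing seen with
  | nil => simp [altLoop, ddS]
  | cons c rest ih =>
    simp only [altLoop, ddS]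
    by_cases h : c ∈ seen
    · rw [if_pos ((contains_iff_mem _ _).mpr h), if_pos h, ih]
    · rw [if_neg (fun hc => h ((contains_iff_mem _ _).mp hc)), if_neg h, ih]

theorem ddS_seen_mono (l : List String) (seen : PySem.Set String) (x : String)
    (h : x ∈ seen) : x ∈ (ddS seen l).1 := by
  induction l generalizing seen with
  | nil => simpa [ddS]
  | cons c rest ih =>
    simp only [ddS]
    by_cases hc : c ∈ seen
    · rw [if_pos hc]; exact ih _ h
    · rw [if_neg hc]
      exact ih _ (by simp [PySem.Set.mem_add, h])

theorem ddS_seen_of_mem (l : List String) (seen : PySem.Set String) (x : String)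
    (h : x ∈ l) : x ∈ (ddS seen l).1 := by
  induction l generalizing seen with
  | nil => simp at h
  | cons c rest ih =>
    simp only [ddS]
    by_cases hc : c ∈ seen
    · rw [if_pos hc]
      rcases List.mem_cons.mp h with h | h
      · exact ddS_seen_mono rest seen x (h ▸ hc)
      · exact ih _ h
    · rw [if_neg hc]
      rcases List.mem_cons.mp h with h | h
      · exact ddS_seen_mono rest _ x (by simp [PySem.Set.mem_add, h])
      · exact ih _ h

theorem ddS_append (l1 l2 : List String) (seen : PySem.Set String) :
    ddS seen (l1 ++ l2)
      = ((ddS (ddS seen l1).1 l2).1, (ddS seen l1).2 ++ (ddS (ddS seen l1).1 l2).2) := by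
  induction l1 generalizing seen with
  | nil => simp [ddS]
  | cons c rest ih =>
    simp only [List.cons_append, ddS]
    by_cases hc : c ∈ seen
    · rw [if_pos hc, if_pos hc, ih]
    · rw [if_neg hc, if_neg hc, ih]
      simp

theorem ddS_filter (l : List String) (p : String → Bool) (seen : PySem.Set String)
    (h : ∀ c ∈ l, p c = false → c ∈ seen) :
    ddS seen (l.filter p) = ddS seen l := by
  induction l generalizing seen with
  | nil => simp
  | cons c rest ih =>
    by_cases hp : p c
    · simp only [List.filter_cons, hp, if_true, ddS]
      by_cases hc : c ∈ seen
      · rw [if_pos hc, if_pos hc]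
        exact ih _ (fun c' hc' hp' => h c' (List.mem_cons_of_mem _ hc') hp')
      · rw [if_neg hc, if_neg hc]
        rw [ih _ (fun c' hc' hp' => by
          simp only [PySem.Set.mem_add]
          exact Or.inl (h c' (List.mem_cons_of_mem _ hc') hp'))]
    · have hcseen : c ∈ seen := h c List.mem_cons_self (by simpa using hp)
      simp only [List.filter_cons, hp, Bool.false_eq_true, if_false, ddS]
      rw [if_pos hcseen]
      exact ih _ (fun c' hc' hp' => h c' (List.mem_cons_of_mem _ hc') hp')

-- ===== VERDICT (by name: the statement is the Claim_ definition above) =====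
theorem stable_union_columns_py_spec : Claim_equal_stable_union_columns_py := by
  intro existing desired _
  unfold Spec_stable_union_columns_py
  unfold stable_union_columns_py stable_union_columns_py_alt
  by_cases he : existing = []
  · simp [he]
  · simp only [he, if_false]
    rw [foldA_eq_ddS, altLoop_eq_ddS]
    simp only [List.nil_append]
    set db := desired.filter (fun c => decide (c ≠ "ts")) with hdb
    set eb := existing.filter (fun c => decide (c ≠ "ts")) with heb
    set f := eb.filter (fun c => !(db.contains c)) with hf
    have hts : "ts" ∈ (ddS PySem.Set.empty ["ts"]).1 :=
      ddS_seen_of_mem _ _ _ (by simp)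
    rw [List.append_assoc, List.append_assoc]
    rw [ddS_append ["ts"] (db ++ f), ddS_append ["ts"] (desired ++ existing),
        ddS_append db f, ddS_append desired existing]
    set s1 := (ddS PySem.Set.empty ["ts"]).1 with hs1
    have hdseg : ddS s1 db = ddS s1 desired := by
      rw [hdb]
      exact ddS_filter _ _ _ (fun c _ hp => by
        have hc : c = "ts" := by simpa using hp
        rw [hc]; exact hts)
    have heseg : ddS (ddS s1 desired).1 f = ddS (ddS s1 desired).1 existing := by
      rw [hf, heb, List.filter_filter]
      refine ddS_filter _ _ _ (fun c hc hp => ?_)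
      simp only [Bool.and_eq_false_iff] at hp
      rcases hp with hp | hp
      · have hcdb : c ∈ db := by simpa using hp
        exact ddS_seen_of_mem desired s1 c (List.mem_of_mem_filter (hdb ▸ hcdb))
      · have hcts : c = "ts" := by simpa using hp
        rw [hcts]
        exact ddS_seen_mono _ _ _ hts
    rw [hdseg, heseg]
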